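-- pv_equiv track=rewrite | github.com/Lego4005/nfl-predictor-api | src/ml/enhanced_features.py | _calculate_ats_streak
-- ===== SOURCE A (Python) =====
-- from typing import Dict, List, Tuple, Optional
--
-- def _calculate_ats_streak(games: List[Dict]) -> int:
--     """Calculate current ATS streak"""
--     if not games:
--         return 0
--
--     streak = 0
--     last_ats = games[-1].get('ats_result')
--
--     for game in reversed(games):
--         if game.get('ats_result') == last_ats and last_ats in ['cover', 'no_cover']:
--             streak += 1 if last_ats == 'cover' else -1
--         else:
--             break
--
--     return streak
-- ===== SOURCE B (Python) =====
-- from typing import Dict, List, Tuple, Optional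
--
-- def _calculate_ats_streak(games: List[Dict]) -> int:
--     """Forward single scan tracking the trailing run of equal ats_result values."""
--     current_value = None
--     current_length = 0
--     for game in games:
--         v = game.get('ats_result')
--         if current_length > 0 and v == current_value:
--             current_length += 1
--         else:
--             current_value = v
--             current_length = 1
--     if current_value == 'cover':
--         return current_length
--     if current_value == 'no_cover':
--         return -current_length
--     return 0
-- ===== Notes on version B (the rewrite author's own statement) =====
-- stated objective: alternative
-- what changed: Replaced A's backwards scan (index games[-1] first, then takewhile over reversed(games) with break) by a single forward fold that maintains the current run's value and length, signing the trailing run at the end.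
import Mathlib
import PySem

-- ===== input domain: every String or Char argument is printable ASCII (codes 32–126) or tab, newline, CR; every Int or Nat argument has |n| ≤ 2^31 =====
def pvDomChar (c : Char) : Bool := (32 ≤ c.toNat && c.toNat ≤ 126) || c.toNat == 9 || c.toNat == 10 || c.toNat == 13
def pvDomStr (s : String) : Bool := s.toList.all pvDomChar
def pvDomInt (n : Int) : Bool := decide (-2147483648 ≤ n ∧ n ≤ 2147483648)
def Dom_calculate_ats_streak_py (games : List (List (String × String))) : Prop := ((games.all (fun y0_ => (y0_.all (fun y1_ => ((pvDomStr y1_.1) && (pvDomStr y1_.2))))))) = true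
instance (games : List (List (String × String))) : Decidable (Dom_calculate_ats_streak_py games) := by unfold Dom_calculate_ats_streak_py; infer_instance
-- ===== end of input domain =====

-- B replaces A's backwards takewhile scan (indexing games[-1] first) by a single forward
-- fold maintaining the current run's value and length; objective: alternative decomposition.

-- game.get('ats_result'): first-match lookup in the association list (exact dict semantics)
def pvAts (g : List (String × String)) : Option String := List.lookup "ats_result" g

-- ===== PORT A =====
-- the 'for game in reversed(games): … else: break' loop, accumulating streak
def pvStreakLoop (last_ats : Option String) : List (List (String × String)) → Int
  | [] => 0
  | g :: rest =>
    if pvAts g == last_ats && (last_ats == some "cover" || last_ats == some "no_cover") then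
      (if last_ats == some "cover" then (1 : Int) else -1) + pvStreakLoop last_ats rest
    else 0

def calculate_ats_streak_py (games : List (List (String × String))) : Int :=
  if h : games = [] then 0           -- 'if not games: return 0'
  else
    -- last_ats = games[-1].get('ats_result')  (games nonempty here)
    pvStreakLoop (pvAts (games.getLast h)) games.reverse

-- ===== PORT B =====
-- loop body: reset to (v, 1) unless the current run continues
def pvStep (s : Option String × Int) (g : List (String × String)) : Option String × Int :=
  let v := pvAts g
  if decide (s.2 > 0) && (v == s.1) then (s.1, s.2 + 1) else (v, 1)

def calculate_ats_streak_py_alt (games : List (List (String × String))) : Int :=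
  let st := games.foldl pvStep (none, 0)
  if st.1 == some "cover" then st.2
  else if st.1 == some "no_cover" then -st.2
  else 0

-- ===== PRECONDITION & SPEC =====
def Spec_calculate_ats_streak_py (games : List (List (String × String))) (out : Int) : Prop := out = calculate_ats_streak_py_alt games
instance (games : List (List (String × String))) (out : Int) : Decidable (Spec_calculate_ats_streak_py games out) := by unfold Spec_calculate_ats_streak_py; infer_instance

-- ===== CLAIM (what is proved, stated in full; the proofs are below) =====
def Claim_equal_calculate_ats_streak_py : Prop := ∀ (games : List (List (String × String))), Dom_calculate_ats_streak_py games → Spec_calculate_ats_streak_py games (calculate_ats_streak_py games)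

-- ===== LEMMAS AND PROOFS =====

-- A's loop is the sign of last_ats times the length of the matching prefix of the reversed list
theorem pvStreakLoop_eq (last : Option String) (gs : List (List (String × String))) :
    pvStreakLoop last gs =
      (if last == some "cover" then (1 : Int) else if last == some "no_cover" then -1 else 0) *
        ((gs.takeWhile (fun g => pvAts g == last)).length : Int) := by
  induction gs with
  | nil => simp [pvStreakLoop]
  | cons g rest ih =>
    by_cases hm : pvAts g == last
    · by_cases hc : last == some "cover"
      · simp [pvStreakLoop, hm, hc, List.takeWhile, ih]; try ring
      · by_cases hn : last == some "no_cover"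
        · simp [pvStreakLoop, hm, hc, hn, List.takeWhile, ih]; try ring
        · simp [pvStreakLoop, hm, hc, hn, List.takeWhile]
    · by_cases hc : last == some "cover" <;> by_cases hn : last == some "no_cover" <;>
        simp [pvStreakLoop, hm, hc, hn, List.takeWhile]

-- B's fold on a nonempty list yields the last value and the trailing run length
theorem pvStep_foldl (xs : List (List (String × String))) (g : List (String × String)) :
    List.foldl pvStep (none, 0) (xs ++ [g]) =
      (pvAts g, 1 + ((xs.reverse.takeWhile (fun x => pvAts x == pvAts g)).length : Int)) := by
  induction xs using List.reverseRecOn generalizing g with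
  | nil => simp [pvStep]
  | append_singleton ys h ih =>
    have e1 := ih h
    rw [List.foldl_append, List.foldl_cons, List.foldl_nil] at e1
    rw [List.append_assoc, List.singleton_append, List.foldl_append,
        List.foldl_cons, List.foldl_cons, List.foldl_nil, e1, List.reverse_append]
    by_cases hm : pvAts g == pvAts h
    · have hv : pvAts h = pvAts g := (beq_iff_eq.mp hm).symm
      simp [pvStep, hv]
      rw [if_pos (by positivity)]
      simp only [Prod.mk.injEq, true_and]
      ring
    · have hm' : (pvAts h == pvAts g) = false := by
        simp only [beq_eq_false_iff_ne] at hm ⊢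
        simp only [beq_iff_eq] at hm ⊢
        exact fun e => hm e.symm
      simp [pvStep, hm']
      exact fun _ e => absurd e (by simpa using hm)

-- ===== VERDICT (by name: the statement is the Claim_ definition above) =====
theorem calculate_ats_streak_py_spec : Claim_equal_calculate_ats_streak_py := by
  intro games _
  unfold Spec_calculate_ats_streak_py
  induction games using List.reverseRecOn with
  | nil => decide
  | append_singleton xs g _ =>
    have hne : xs ++ [g] ≠ [] := by simp
    have hlast : (xs ++ [g]).getLast hne = g := by
      simp
    unfold calculate_ats_streak_py calculate_ats_streak_py_alt
    rw [dif_neg hne, hlast, pvStep_foldl, List.reverse_append]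
    simp only [List.reverse_cons, List.reverse_nil, List.nil_append, List.singleton_append]
    rw [pvStreakLoop_eq]
    by_cases hc : pvAts g == some "cover" <;> by_cases hn : pvAts g == some "no_cover" <;>
      simp [hc, hn, List.takeWhile] <;> ring
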